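-- pv_equiv track=rewrite | github.com/Sonu-Suman/codeforces_7243 | math/python/2_LCM_Problem/v1.py | solve
-- ===== SOURCE A (Python) =====
-- import math
--
-- def solve(s):
--     for i in range(s[0], s[1]):
--         x = i
--         for j in range(x + 1, s[1] + 1):
--             y = j
--             l = math.lcm(x, y)
--             if s[0] <= l <= s[1]:
--                 return x, y
--
--     return -1, -1
-- ===== SOURCE B (Python) =====
-- import math
--
-- def solve(s):
--     # The answer, if one exists, always lies in the first row of A's outer loop;
--     # and for positive l it exists iff 2*l <= r. So one guarded single scan suffices.
--     l, r = s[0], s[1]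
--     if r <= l or r < 0 or (l > 0 and r < 2 * l):
--         return -1, -1
--     for j in range(l + 1, r + 1):
--         if math.lcm(l, j) <= r:
--             return l, j
--     return -1, -1  # unreachable under the guards above
-- ===== Notes on version B (the rewrite author's own statement) =====
-- stated objective: alternative
-- what changed: B replaces A's quadratic nested scan by a proved reduction: the first pair A finds always lies in the first row of A's outer loop, and for positive l no pair exists when r < 2l, so B does constant-time guards plus a single scan of that one row.
import Mathlib
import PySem

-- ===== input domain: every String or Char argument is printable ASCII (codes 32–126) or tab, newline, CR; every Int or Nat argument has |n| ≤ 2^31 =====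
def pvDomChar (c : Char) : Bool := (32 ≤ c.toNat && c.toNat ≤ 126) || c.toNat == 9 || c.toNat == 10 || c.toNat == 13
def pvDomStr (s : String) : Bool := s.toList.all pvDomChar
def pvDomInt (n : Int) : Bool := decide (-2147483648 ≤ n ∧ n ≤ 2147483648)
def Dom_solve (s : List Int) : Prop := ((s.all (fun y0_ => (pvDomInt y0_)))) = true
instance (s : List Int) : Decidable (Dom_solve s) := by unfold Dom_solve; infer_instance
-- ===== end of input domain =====

-- B replaces A's quadratic nested scan by a proved reduction to a single guarded scan of the first row of A's outer loop.
-- math.lcm(x, y) = lcm of absolute values, as an Int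
def lcmZ (x y : Int) : Int := (Int.lcm x y : Int)

-- ===== PORT A =====
-- inner loop: for j in range(x+1, s1+1): …
def solveInner (s0 s1 x : Int) : List Int → Option (List Int)
  | [] => none
  | j :: rest =>
    let y := j
    let l := lcmZ x y
    if s0 ≤ l ∧ l ≤ s1 then some [x, y] else solveInner s0 s1 x rest

-- outer loop: for i in range(s0, s1): …
def solveOuter (s0 s1 : Int) : List Int → Option (List Int)
  | [] => none
  | i :: rest =>
    let x := i
    match solveInner s0 s1 x (PySem.List.pyRange (x + 1) (s1 + 1) 1) with
    | some p => some p
    | none => solveOuter s0 s1 rest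

def solve (s : List Int) : List Int :=
  let s0 := (PySem.List.pyGet? s 0).getD 0   -- s[0]; Pre_solve rules out the IndexError
  let s1 := (PySem.List.pyGet? s 1).getD 0   -- s[1]
  match solveOuter s0 s1 (PySem.List.pyRange s0 s1 1) with
  | some p => p
  | none => [-1, -1]

-- ===== PORT B =====
-- single scan of the first row: first j with lcm(l, j) ≤ r
def findRow (l r : Int) : List Int → Option (List Int)
  | [] => none
  | j :: rest => if lcmZ l j ≤ r then some [l, j] else findRow l r rest

def solve_alt (s : List Int) : List Int :=
  let l := (PySem.List.pyGet? s 0).getD 0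
  let r := (PySem.List.pyGet? s 1).getD 0
  if r ≤ l ∨ r < 0 ∨ (0 < l ∧ r < 2 * l) then [-1, -1]
  else
    match findRow l r (PySem.List.pyRange (l + 1) (r + 1) 1) with
    | some p => p
    | none => [-1, -1]

-- ===== PRECONDITION & SPEC =====
-- A raises IndexError when the list has fewer than two elements; nothing else is excluded.
def Pre_solve (s : List Int) : Prop := 2 ≤ s.length
instance (s : List Int) : Decidable (Pre_solve s) := by unfold Pre_solve; infer_instance
def pvWitness_solve : List Int := [2, 7]

def Spec_solve (s : List Int) (out : List Int) : Prop := out = solve_alt s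
instance (s : List Int) (out : List Int) : Decidable (Spec_solve s out) := by unfold Spec_solve; infer_instance

-- ===== CLAIM (what is proved, stated in full; the proofs are below) =====
def Claim_equal_solve : Prop := ∀ (s : List Int), Dom_solve s → Pre_solve s → Spec_solve s (solve s)


-- ===== LEMMAS AND PROOFS =====

theorem lcmZ_nonneg (x y : Int) : 0 ≤ lcmZ x y := Int.natCast_nonneg _

theorem lcmZ_eq_nat (x y : Int) : lcmZ x y = (Nat.lcm x.natAbs y.natAbs : Int) := rfl

-- in the first row the lower bound s0 ≤ lcm is automatic
theorem le_lcmZ_row (l j : Int) (h : l < j) : l ≤ lcmZ l j := by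
  by_cases h0 : l ≤ 0
  · exact le_trans h0 (lcmZ_nonneg l j)
  · have hln : l.natAbs ≠ 0 := by omega
    have hjn : j.natAbs ≠ 0 := by omega
    have hle : j.natAbs ≤ Nat.lcm l.natAbs j.natAbs :=
      Nat.le_of_dvd (Nat.pos_of_ne_zero (Nat.lcm_ne_zero hln hjn)) (Nat.dvd_lcm_right _ _)
    rw [lcmZ_eq_nat]
    omega

-- for 0 < i < j the lcm is at least 2*i
theorem two_mul_le_lcmZ (i j : Int) (hi : 0 < i) (hij : i < j) : 2 * i ≤ lcmZ i j := by
  have hin : i.natAbs ≠ 0 := by omega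
  have hjn : j.natAbs ≠ 0 := by omega
  have hle : j.natAbs ≤ Nat.lcm i.natAbs j.natAbs :=
    Nat.le_of_dvd (Nat.pos_of_ne_zero (Nat.lcm_ne_zero hin hjn)) (Nat.dvd_lcm_right _ _)
  have hlt : i.natAbs < Nat.lcm i.natAbs j.natAbs := by omega
  obtain ⟨k, hk⟩ := Nat.dvd_lcm_left i.natAbs j.natAbs
  have h2 : 2 * i.natAbs ≤ Nat.lcm i.natAbs j.natAbs := by
    match k, hk with
    | 0, hk => omega
    | 1, hk => omega
    | (m+2), hk =>
      have : i.natAbs * (m + 2) = i.natAbs * m + i.natAbs * 2 := by ring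
      omega
  rw [lcmZ_eq_nat]
  omega

theorem lcmZ_zero_right (l : Int) : lcmZ l 0 = 0 := by
  rw [lcmZ_eq_nat]; simp

theorem lcmZ_zero_left (j : Int) : lcmZ 0 j = 0 := by
  rw [lcmZ_eq_nat]; simp

theorem lcmZ_two_mul (l : Int) (hl : 0 < l) : lcmZ l (2 * l) = 2 * l := by
  have habs : (2 * l).natAbs = 2 * l.natAbs := by omega
  have hdvd : l.natAbs ∣ 2 * l.natAbs := Dvd.intro_left 2 rfl
  have : Nat.lcm l.natAbs (2 * l.natAbs) = 2 * l.natAbs :=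
    Nat.dvd_antisymm (Nat.lcm_dvd hdvd dvd_rfl) (Nat.dvd_lcm_right _ _)
  rw [lcmZ_eq_nat, habs, this]
  omega

theorem inner_none (s0 s1 x : Int) (js : List Int)
    (h : ∀ j ∈ js, ¬ (s0 ≤ lcmZ x j ∧ lcmZ x j ≤ s1)) :
    solveInner s0 s1 x js = none := by
  induction js with
  | nil => rfl
  | cons j rest ih =>
    simp only [solveInner]
    rw [if_neg (h j (List.mem_cons_self))]
    exact ih (fun j' hj' => h j' (List.mem_cons_of_mem _ hj'))

theorem outer_none (s0 s1 : Int) (is : List Int)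
    (h : ∀ i ∈ is, solveInner s0 s1 i (PySem.List.pyRange (i + 1) (s1 + 1) 1) = none) :
    solveOuter s0 s1 is = none := by
  induction is with
  | nil => rfl
  | cons i rest ih =>
    simp only [solveOuter, h i (List.mem_cons_self)]
    exact ih (fun i' hi' => h i' (List.mem_cons_of_mem _ hi'))

theorem inner_eq_findRow (l r : Int) (js : List Int) (h : ∀ j ∈ js, l < j) :
    solveInner l r l js = findRow l r js := by
  induction js with
  | nil => rfl
  | cons j rest ih =>
    simp only [solveInner, findRow]
    have hlow : l ≤ lcmZ l j := le_lcmZ_row l j (h j (List.mem_cons_self))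
    have : (l ≤ lcmZ l j ∧ lcmZ l j ≤ r) ↔ (lcmZ l j ≤ r) := by tauto
    rw [if_congr this rfl rfl]
    split
    · rfl
    · exact ih (fun j' hj' => h j' (List.mem_cons_of_mem _ hj'))

theorem findRow_none (l r : Int) (js : List Int) (h : findRow l r js = none) :
    ∀ j ∈ js, ¬ lcmZ l j ≤ r := by
  induction js with
  | nil => intro j hj; simp at hj
  | cons j rest ih =>
    intro j' hj'
    simp only [findRow] at h
    by_cases hc : lcmZ l j ≤ r
    · rw [if_pos hc] at h; exact absurd h (by simp)
    · rw [if_neg hc] at h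
      rcases List.mem_cons.mp hj' with rfl | hmem
      · exact hc
      · exact ih h j' hmem

theorem main_eq (l r : Int) :
    (match solveOuter l r (PySem.List.pyRange l r 1) with
     | some p => p | none => [-1, -1]) =
    (if r ≤ l ∨ r < 0 ∨ (0 < l ∧ r < 2 * l) then [-1, -1]
     else match findRow l r (PySem.List.pyRange (l + 1) (r + 1) 1) with
          | some p => p | none => [-1, -1]) := by
  by_cases hrl : r ≤ l
  · rw [PySem.List.pyRange_one_eq_nil hrl, if_pos (Or.inl hrl)]
    rfl
  push Not at hrl
  by_cases hr0 : r < 0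
  · rw [if_pos (Or.inr (Or.inl hr0))]
    rw [outer_none l r _ (fun i _ => inner_none l r i _
      (fun j _ hcond => absurd hcond.2 (by have := lcmZ_nonneg i j; omega)))]
  push Not at hr0
  by_cases hcase : 0 < l ∧ r < 2 * l
  · rw [if_pos (Or.inr (Or.inr hcase))]
    rw [outer_none l r _ ?_]
    intro i hi
    have hil : l ≤ i ∧ i < r := (PySem.List.mem_pyRange_one).mp hi
    refine inner_none l r i _ (fun j hj hcond => ?_)
    have hij : i + 1 ≤ j ∧ j < r + 1 := (PySem.List.mem_pyRange_one).mp hj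
    have h2 : 2 * i ≤ lcmZ i j := two_mul_le_lcmZ i j (by omega) (by omega)
    have := hcond.2
    omega
  · rw [if_neg (by omega)]
    rw [PySem.List.pyRange_one_cons hrl]
    have hrow : solveInner l r l (PySem.List.pyRange (l + 1) (r + 1) 1) =
        findRow l r (PySem.List.pyRange (l + 1) (r + 1) 1) :=
      inner_eq_findRow l r _ (fun j hj => by
        have := (PySem.List.mem_pyRange_one).mp hj; omega)
    have hsome : findRow l r (PySem.List.pyRange (l + 1) (r + 1) 1) ≠ none := by
      intro hn
      have hall := findRow_none l r _ hn
      rcases lt_trichotomy l 0 with hl | hl | hl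
      · exact hall 0 ((PySem.List.mem_pyRange_one).mpr (by omega))
          (by rw [lcmZ_zero_right]; omega)
      · subst hl
        exact hall 1 ((PySem.List.mem_pyRange_one).mpr (by omega))
          (by rw [lcmZ_zero_left]; omega)
      · have h2l : 2 * l ≤ r := by omega
        exact hall (2 * l) ((PySem.List.mem_pyRange_one).mpr (by omega))
          (by rw [lcmZ_two_mul l hl]; omega)
    obtain ⟨p, hp⟩ := Option.ne_none_iff_exists'.mp hsome
    simp only [solveOuter, hrow, hp]

-- ===== VERDICT (by name: the statement is the Claim_ definition above) =====
theorem solve_spec : Claim_equal_solve := by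
  intro s _ _
  unfold Spec_solve solve solve_alt
  exact main_eq _ _
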